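-- pv_equiv track=rewrite | github.com/anurag203/clarify-rl | scripts/make_trace_demo_run1.py | _pick_scenarios
-- ===== SOURCE A (Python) =====
-- from typing import Any
--
-- def _pick_scenarios(
--     base_idx: dict[str, dict[str, Any]],
--     trained_idx: dict[str, dict[str, Any]],
-- ) -> list[tuple[str, str]]:
--     """Return list of (scenario_id, label) tuples — picks 3 illustrative cases."""
--     common = sorted(set(base_idx) & set(trained_idx))
--     picks: list[tuple[str, str]] = []
--
--     base_winners = sorted(
--         [sid for sid in common if (base_idx[sid].get("final_score") or 0) > 0],
--         key=lambda s: -(base_idx[s].get("final_score") or 0),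
--     )
--     if base_winners:
--         picks.append((base_winners[0], "Untrained 4B WIN — gap that more training closes"))
--
--     eff = sorted(
--         common,
--         key=lambda s: (
--             (trained_idx[s].get("questions_asked") or 0)
--             - (base_idx[s].get("questions_asked") or 0)
--         ),
--     )
--     for sid in eff:
--         if sid in {p[0] for p in picks}:
--             continue
--         delta = (base_idx[sid].get("questions_asked") or 0) - (trained_idx[sid].get("questions_asked") or 0)
--         if delta >= 3:
--             picks.append((sid, "Question efficiency win — trained asks far fewer"))
--             break
--
--     for sid in common:
--         if sid in {p[0] for p in picks}:
--             continue
--         b = base_idx[sid]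
--         t = trained_idx[sid]
--         if (t.get("questions_asked") or 0) >= 1 and (t.get("final_score") or 0) == 0:
--             picks.append((sid, "Failure mode — trained submits wrong-schema plan"))
--             break
--
--     if len(picks) < 3 and common:
--         for sid in common:
--             if sid not in {p[0] for p in picks}:
--                 picks.append((sid, "Comparable scenario"))
--             if len(picks) >= 3:
--                 break
--     return picks[:3]
-- ===== SOURCE B (Python) =====
-- def _pick_scenarios(
--     base_idx,
--     trained_idx,
-- ):
--     """Return list of (scenario_id, label) tuples — picks 3 illustrative cases."""
--     common = sorted(set(base_idx) & set(trained_idx))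
--     picks = []
--
--     best_sid, best_score = None, 0
--     for sid in common:
--         score = base_idx[sid].get("final_score") or 0
--         if score > best_score:
--             best_sid, best_score = sid, score
--     if best_sid is not None:
--         picks.append((best_sid, "Untrained 4B WIN — gap that more training closes"))
--
--     best_eff = None  # (sid, delta) with the strictly largest delta, first-seen wins
--     for sid in common:
--         if picks and sid == picks[0][0]:
--             continue
--         delta = (base_idx[sid].get("questions_asked") or 0) - (trained_idx[sid].get("questions_asked") or 0)
--         if best_eff is None or delta > best_eff[1]:
--             best_eff = (sid, delta)
--     if best_eff is not None and best_eff[1] >= 3: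
--         picks.append((best_eff[0], "Question efficiency win — trained asks far fewer"))
--
--     picked = {p[0] for p in picks}
--     fail_sid = next(
--         (s for s in common
--          if s not in picked
--          and (trained_idx[s].get("questions_asked") or 0) >= 1
--          and (trained_idx[s].get("final_score") or 0) == 0),
--         None,
--     )
--     if fail_sid is not None:
--         picks.append((fail_sid, "Failure mode — trained submits wrong-schema plan"))
--         picked.add(fail_sid)
--
--     if len(picks) < 3:
--         fillers = [s for s in common if s not in picked][: 3 - len(picks)]
--         picks.extend((s, "Comparable scenario") for s in fillers)
--     return picks[:3]
-- ===== Notes on version B (the rewrite author's own statement) =====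
-- stated objective: alternative
-- what changed: The two sorts (by -final_score over winners, and by question-delta over common) are replaced by single linear max-scans with strict comparisons (first-seen wins ties, matching the stable sorts), and the last two loops become a next()/generator lookup and a sliced filter.
import Mathlib
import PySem

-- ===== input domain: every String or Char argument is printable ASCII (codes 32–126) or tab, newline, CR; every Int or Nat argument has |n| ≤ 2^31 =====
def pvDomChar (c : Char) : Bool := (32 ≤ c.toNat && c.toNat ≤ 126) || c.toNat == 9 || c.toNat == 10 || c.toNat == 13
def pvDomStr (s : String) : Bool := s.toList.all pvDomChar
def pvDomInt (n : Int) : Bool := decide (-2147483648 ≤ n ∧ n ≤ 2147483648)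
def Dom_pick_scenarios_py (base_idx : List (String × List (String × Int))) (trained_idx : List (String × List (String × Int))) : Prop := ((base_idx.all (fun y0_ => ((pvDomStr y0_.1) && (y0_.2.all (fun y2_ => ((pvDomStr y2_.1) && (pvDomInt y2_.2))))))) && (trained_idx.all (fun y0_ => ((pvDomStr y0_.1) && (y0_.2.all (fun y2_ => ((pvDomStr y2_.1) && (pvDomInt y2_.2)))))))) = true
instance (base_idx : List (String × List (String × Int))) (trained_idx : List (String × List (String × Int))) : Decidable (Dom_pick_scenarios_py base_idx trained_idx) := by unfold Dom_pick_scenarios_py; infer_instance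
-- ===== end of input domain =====

-- B replaces A's two stable sorts by single linear max-scans over `common` (strict
-- comparisons reproduce the sorts' tie-breaking); both Pythons are pure (no mutation).

-- ===== PORT A =====

-- `d[sid].get(key) or 0` (values are ints, so `or 0` coalesces exactly None and 0 to 0);
-- the outer lookup `d[sid]` is only reached with sid ∈ keys, so the total `getD [] ` form is exact there
def pvGet2 (d : List (String × List (String × Int))) (sid k : String) : Int :=
  PySem.Dict.getD (PySem.Dict.mk (PySem.Dict.getD (PySem.Dict.mk d) sid [])) k 0

-- `sorted(set(base_idx) & set(trained_idx))` (both ports share this first line of both Pythons)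
def pvCommon (base_idx trained_idx : List (String × List (String × Int))) : List String :=
  PySem.List.sorted
    (PySem.Set.inter (PySem.Set.ofList (base_idx.map Prod.fst)) (trained_idx.map Prod.fst))
    (fun s => s) false

-- A's `for sid in eff: … continue / append; break` loop
def pvEffLoopA (b t : List (String × List (String × Int))) (picks : List (String × String)) :
    List String → List (String × String)
  | [] => picks
  | sid :: rest =>
    if (picks.map Prod.fst).contains sid then pvEffLoopA b t picks rest
    else if 3 ≤ pvGet2 b sid "questions_asked" - pvGet2 t sid "questions_asked" then
      picks ++ [(sid, "Question efficiency win — trained asks far fewer")]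
    else pvEffLoopA b t picks rest

-- A's failure-mode loop
def pvFailLoopA (t : List (String × List (String × Int))) (picks : List (String × String)) :
    List String → List (String × String)
  | [] => picks
  | sid :: rest =>
    if (picks.map Prod.fst).contains sid then pvFailLoopA t picks rest
    else if 1 ≤ pvGet2 t sid "questions_asked" ∧ pvGet2 t sid "final_score" = 0 then
      picks ++ [(sid, "Failure mode — trained submits wrong-schema plan")]
    else pvFailLoopA t picks rest

-- A's final fill loop (append, then `if len(picks) >= 3: break`)
def pvFillLoopA (picks : List (String × String)) : List String → List (String × String)
  | [] => picks
  | sid :: rest =>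
    let picks' := if (picks.map Prod.fst).contains sid then picks
                  else picks ++ [(sid, "Comparable scenario")]
    if 3 ≤ picks'.length then picks' else pvFillLoopA picks' rest

def pick_scenarios_py (base_idx : List (String × List (String × Int))) (trained_idx : List (String × List (String × Int))) : List (String × String) :=
  let common := pvCommon base_idx trained_idx
  let picks0 : List (String × String) := []
  let base_winners :=
    PySem.List.sorted (common.filter (fun s => decide (0 < pvGet2 base_idx s "final_score")))
      (fun s => -(pvGet2 base_idx s "final_score")) false
  let picks1 := match base_winners with
    | [] => picks0
    | w :: _ => picks0 ++ [(w, "Untrained 4B WIN — gap that more training closes")]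
  let eff := PySem.List.sorted common
      (fun s => pvGet2 trained_idx s "questions_asked" - pvGet2 base_idx s "questions_asked") false
  let picks2 := pvEffLoopA base_idx trained_idx picks1 eff
  let picks3 := pvFailLoopA trained_idx picks2 common
  let picks4 := if picks3.length < 3 ∧ common ≠ [] then pvFillLoopA picks3 common else picks3
  picks4.take 3   -- picks[:3]

-- ===== PORT B =====

-- linear scan: sid with the strictly largest positive final_score (first one wins ties)
def pvBestWin (b : List (String × List (String × Int))) (common : List String) :
    Option String × Int :=
  common.foldl (fun acc sid =>
    let score := pvGet2 b sid "final_score"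
    if acc.2 < score then (some sid, score) else acc) (none, 0)

-- linear scan: (sid, delta) with the strictly largest delta among non-skipped sids
def pvBestEff (b t : List (String × List (String × Int))) (skip : Option String)
    (common : List String) : Option (String × Int) :=
  common.foldl (fun acc sid =>
    if skip = some sid then acc
    else
      let delta := pvGet2 b sid "questions_asked" - pvGet2 t sid "questions_asked"
      match acc with
      | none => some (sid, delta)
      | some best => if best.2 < delta then some (sid, delta) else acc) none

def pick_scenarios_py_alt (base_idx : List (String × List (String × Int))) (trained_idx : List (String × List (String × Int))) : List (String × String) :=
  let common := pvCommon base_idx trained_idx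
  let best := pvBestWin base_idx common
  let picks1 := match best.1 with
    | none => ([] : List (String × String))
    | some sid => [(sid, "Untrained 4B WIN — gap that more training closes")]
  let bestEff := pvBestEff base_idx trained_idx (picks1.head?.map Prod.fst) common
  let picks2 := match bestEff with
    | none => picks1
    | some be => if 3 ≤ be.2 then picks1 ++ [(be.1, "Question efficiency win — trained asks far fewer")] else picks1
  let picked := picks2.map Prod.fst
  let failSid := common.find? (fun s => !(picked.contains s)
      && decide (1 ≤ pvGet2 trained_idx s "questions_asked")
      && decide (pvGet2 trained_idx s "final_score" = 0))
  let picks3 : List (String × String) := match failSid with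
    | none => picks2
    | some s => picks2 ++ [(s, "Failure mode — trained submits wrong-schema plan")]
  let picked3 := picks3.map Prod.fst
  let picks4 := if picks3.length < 3 then
      picks3 ++ ((common.filter (fun s => !(picked3.contains s))).take (3 - picks3.length)).map
        (fun s => (s, "Comparable scenario"))
    else picks3
  picks4.take 3   -- picks[:3]

-- ===== PRECONDITION & SPEC =====
def Spec_pick_scenarios_py (base_idx : List (String × List (String × Int))) (trained_idx : List (String × List (String × Int))) (out : List (String × String)) : Prop := out = pick_scenarios_py_alt base_idx trained_idx
instance (base_idx : List (String × List (String × Int))) (trained_idx : List (String × List (String × Int))) (out : List (String × String)) : Decidable (Spec_pick_scenarios_py base_idx trained_idx out) := by unfold Spec_pick_scenarios_py; infer_instance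

-- ===== CLAIM (what is proved, stated in full; the proofs are below) =====
def Claim_equal_pick_scenarios_py : Prop := ∀ (base_idx : List (String × List (String × Int))) (trained_idx : List (String × List (String × Int))), Dom_pick_scenarios_py base_idx trained_idx → Spec_pick_scenarios_py base_idx trained_idx (pick_scenarios_py base_idx trained_idx)

-- ===== LEMMAS AND PROOFS =====

-- first element (by position) whose key is strictly below every earlier minimum:
-- the head of the stable insertion sort
def pvMinFirst {α : Type} (key : α → Int) (l : List α) (h0 : Option α) : Option α :=
  l.foldl (fun h x => match h with
    | none => some x
    | some y => if key x < key y then some x else some y) h0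

theorem head?_insertBy {α : Type} (before : α → α → Bool) (x : α) (l : List α) :
    (PySem.List.insertBy before x l).head? =
      some (match l.head? with
        | none => x
        | some y => if before x y then x else y) := by
  cases l
  · simp [PySem.List.insertBy]
  · simp [PySem.List.insertBy]; split <;> simp

theorem head?_foldl_insertBy {α : Type} (key : α → Int) :
    ∀ (l : List α) (acc : List α),
      (l.foldl (fun a x => PySem.List.insertBy (fun a b => decide (key a < key b)) x a) acc).head? =
        pvMinFirst key l acc.head? := by
  intro l
  induction l with
  | nil => intro acc; simp [pvMinFirst]
  | cons x rest ih =>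
    intro acc
    simp only [List.foldl_cons, pvMinFirst, ih, head?_insertBy]
    cases acc with
    | nil => rfl
    | cons y t => simp [pvMinFirst]; split <;> simp

theorem head?_sorted {α : Type} (key : α → Int) (xs : List α) :
    (PySem.List.sorted xs key false).head? = pvMinFirst key xs none := by
  rw [PySem.List.sorted_eq_foldl_insertBy, head?_foldl_insertBy]
  rfl

-- insertBy into a key-sorted list keeps it key-sorted
theorem pairwise_insertBy {α : Type} (key : α → Int) (x : α) :
    ∀ (l : List α), l.Pairwise (fun a b => key a ≤ key b) →
      (PySem.List.insertBy (fun a b => decide (key a < key b)) x l).Pairwise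
        (fun a b => key a ≤ key b) := by
  intro l
  induction l with
  | nil => intro _; simp [PySem.List.insertBy]
  | cons y t ih =>
    intro h
    rw [List.pairwise_cons] at h
    obtain ⟨h1, h2⟩ := h
    simp only [PySem.List.insertBy]
    by_cases hxy : key x < key y
    · simp only [hxy, decide_true, if_pos]
      refine List.Pairwise.cons ?_ (List.Pairwise.cons h1 h2)
      intro z hz
      rcases List.mem_cons.mp hz with rfl | hz
      · omega
      · have := h1 z hz; omega
    · simp only [hxy, decide_false, if_neg, Bool.false_eq_true, not_false_iff]
      refine List.Pairwise.cons ?_ (ih h2)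
      intro z hz
      rcases (PySem.List.mem_insertBy _ _ _ _).mp hz with rfl | hz
      · omega
      · exact h1 z hz

-- filtering commutes with one insertion into a sorted list
theorem filter_insertBy {α : Type} (key : α → Int) (p : α → Bool) (x : α) :
    ∀ (l : List α), l.Pairwise (fun a b => key a ≤ key b) →
      (PySem.List.insertBy (fun a b => decide (key a < key b)) x l).filter p =
        (if p x then PySem.List.insertBy (fun a b => decide (key a < key b)) x (l.filter p)
         else l.filter p) := by
  intro l
  induction l with
  | nil => intro _; by_cases hp : p x <;> simp [PySem.List.insertBy, hp]
  | cons y t ih =>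
    intro h
    rw [List.pairwise_cons] at h
    obtain ⟨h1, h2⟩ := h
    simp only [PySem.List.insertBy]
    by_cases hxy : key x < key y
    · simp only [hxy, decide_true, if_pos]
      by_cases hp : p x
      · simp only [hp, if_pos, List.filter_cons_of_pos hp]
        cases hf : (y :: t).filter p with
        | nil => simp [PySem.List.insertBy, hf]
        | cons z rest =>
          have hz : z ∈ y :: t := List.mem_of_mem_filter (hf ▸ List.mem_cons_self)
          have hxz : key x < key z := by
            rcases List.mem_cons.mp hz with rfl | hz
            · exact hxy
            · have := h1 z hz; omega
          simp [PySem.List.insertBy, hf, hxz]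
      · simp [hp, List.filter_cons_of_neg (by simp [Bool.not_eq_true] at hp ⊢; exact hp)]
    · simp only [hxy, decide_false, if_neg, Bool.false_eq_true, not_false_iff]
      by_cases hpy : p y
      · rw [List.filter_cons_of_pos hpy, List.filter_cons_of_pos hpy, ih h2]
        by_cases hp : p x
        · simp only [hp, if_pos]
          have : PySem.List.insertBy (fun a b => decide (key a < key b)) x (y :: t.filter p) =
              y :: PySem.List.insertBy (fun a b => decide (key a < key b)) x (t.filter p) := by
            simp [PySem.List.insertBy, hxy]
          rw [this]
        · simp [hp]
      · have hpy' : p y = false := by simpa using hpy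
        rw [List.filter_cons_of_neg (by simp [hpy']), List.filter_cons_of_neg (by simp [hpy']),
          ih h2]

-- filtering commutes with the stable sort
theorem filter_foldl_insertBy {α : Type} (key : α → Int) (p : α → Bool) :
    ∀ (l : List α) (acc : List α), acc.Pairwise (fun a b => key a ≤ key b) →
      ((l.foldl (fun a x => PySem.List.insertBy (fun a b => decide (key a < key b)) x a)
          acc).filter p) =
        (l.filter p).foldl (fun a x => PySem.List.insertBy (fun a b => decide (key a < key b)) x a)
          (acc.filter p) := by
  intro l
  induction l with
  | nil => intro acc _; rfl
  | cons x t ih =>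
    intro acc h
    simp only [List.foldl_cons]
    rw [ih _ (pairwise_insertBy key x acc h), filter_insertBy key p x acc h]
    by_cases hp : p x
    · rw [List.filter_cons_of_pos hp]
      simp [hp]
    · have hp' : p x = false := by simpa using hp
      rw [List.filter_cons_of_neg (by simp [hp'])]
      simp [hp']

theorem filter_sorted {α : Type} (key : α → Int) (p : α → Bool) (xs : List α) :
    (PySem.List.sorted xs key false).filter p = PySem.List.sorted (xs.filter p) key false := by
  rw [PySem.List.sorted_eq_foldl_insertBy, PySem.List.sorted_eq_foldl_insertBy,
    filter_foldl_insertBy key p xs [] (by simp)]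
  rfl

theorem find?_eq_head?_filter {α : Type} (p : α → Bool) (l : List α) :
    l.find? p = (l.filter p).head? := by
  induction l with
  | nil => rfl
  | cons x t ih =>
    by_cases h : p x = true
    · simp [List.find?_cons_of_pos h, List.filter_cons_of_pos h]
    · simp only [Bool.not_eq_true] at h
      rw [List.find?_cons_of_neg (by simp [h]), List.filter_cons_of_neg (by simp [h]), ih]

-- ===== pass 1: the head of the score-sorted winner list is B's linear max-scan =====
theorem bestWin_go {α : Type} (f : α → Int) :
    ∀ (l : List α) (y : α), 0 < f y →
      (l.foldl (fun acc s => if acc.2 < f s then (some s, f s) else acc)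
        ((some y : Option α), f y)).1 =
      pvMinFirst (fun s => -(f s)) (l.filter (fun s => decide (0 < f s))) (some y) := by
  intro l
  induction l with
  | nil => intro y _; simp [pvMinFirst]
  | cons x t ih =>
    intro y hy
    simp only [List.foldl_cons]
    by_cases hc : f y < f x
    · have hx : (0 : Int) < f x := by omega
      rw [List.filter_cons_of_pos (by simpa using hx)]
      simp only [pvMinFirst, List.foldl_cons]
      rw [if_pos hc, if_pos (by omega : -(f x) < -(f y))]
      exact ih x hx
    · rw [if_neg (by simpa using hc)]
      by_cases hx : (0 : Int) < f x
      · rw [List.filter_cons_of_pos (by simpa using hx)]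
        simp only [pvMinFirst, List.foldl_cons]
        rw [if_neg (by omega : ¬ -(f x) < -(f y))]
        exact ih y hy
      · rw [List.filter_cons_of_neg (by simpa using hx)]
        exact ih y hy

theorem bestWin_eq {α : Type} (f : α → Int) (l : List α) :
    (l.foldl (fun acc s => if acc.2 < f s then (some s, f s) else acc)
      ((none : Option α), (0 : Int))).1 =
    pvMinFirst (fun s => -(f s)) (l.filter (fun s => decide (0 < f s))) none := by
  induction l with
  | nil => simp [pvMinFirst]
  | cons x t ih =>
    simp only [List.foldl_cons]
    by_cases hx : (0 : Int) < f x
    · rw [if_pos (by simpa using hx), List.filter_cons_of_pos (by simpa using hx)]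
      simp only [pvMinFirst, List.foldl_cons]
      exact bestWin_go f t x hx
    · rw [if_neg (by simpa using hx), List.filter_cons_of_neg (by simpa using hx)]
      exact ih

-- ===== pass 2: B's skip-and-max scan vs A's walk over the delta-sorted list =====
def pvExtract3 {α : Type} (o : Option (α × Int)) : Option α :=
  match o with
  | none => none
  | some (s, d) => if 3 ≤ d then some s else none

-- one step of B's second scan
def pvEffStep {α : Type} (g : α → Int) (acc : Option (α × Int)) (s : α) : Option (α × Int) :=
  match acc with
  | none => some (s, g s)
  | some best => if best.2 < g s then some (s, g s) else acc

theorem pvEffStep_none {α : Type} (g : α → Int) (s : α) :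
    pvEffStep g none s = some (s, g s) := rfl

theorem pvEffStep_some {α : Type} (g : α → Int) (z : α) (d : Int) (s : α) :
    pvEffStep g (some (z, d)) s = if d < g s then some (s, g s) else some (z, d) := rfl

theorem bestEff_go_ge {α : Type} (g : α → Int) :
    ∀ (l : List α) (z : α), 3 ≤ g z →
      pvExtract3 (l.foldl (pvEffStep g) (some (z, g z))) =
      pvMinFirst (fun s => -(g s)) (l.filter (fun s => decide (3 ≤ g s))) (some z) := by
  intro l
  induction l with
  | nil => intro z hz; simp [pvExtract3, pvMinFirst, hz]
  | cons x t ih =>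
    intro z hz
    simp only [List.foldl_cons, pvEffStep_some]
    by_cases hlt : g z < g x
    · have hx : (3 : Int) ≤ g x := by omega
      rw [if_pos hlt, List.filter_cons_of_pos (by simpa using hx)]
      simp only [pvMinFirst, List.foldl_cons]
      rw [if_pos (by omega : -(g x) < -(g z))]
      exact ih x hx
    · rw [if_neg hlt]
      by_cases hx : (3 : Int) ≤ g x
      · rw [List.filter_cons_of_pos (by simpa using hx)]
        simp only [pvMinFirst, List.foldl_cons]
        rw [if_neg (by omega : ¬ -(g x) < -(g z))]
        exact ih z hz
      · rw [List.filter_cons_of_neg (by simpa using hx)]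
        exact ih z hz

theorem bestEff_go_lt {α : Type} (g : α → Int) :
    ∀ (l : List α) (z : α), g z < 3 →
      pvExtract3 (l.foldl (pvEffStep g) (some (z, g z))) =
      pvMinFirst (fun s => -(g s)) (l.filter (fun s => decide (3 ≤ g s))) none := by
  intro l
  induction l with
  | nil => intro z hz; simp [pvExtract3, pvMinFirst]; omega
  | cons x t ih =>
    intro z hz
    simp only [List.foldl_cons, pvEffStep_some]
    by_cases hx : (3 : Int) ≤ g x
    · rw [if_pos (by omega : g z < g x), List.filter_cons_of_pos (by simpa using hx)]
      simp only [pvMinFirst, List.foldl_cons]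
      exact bestEff_go_ge g t x hx
    · rw [List.filter_cons_of_neg (by simpa using hx)]
      by_cases hlt : g z < g x
      · rw [if_pos hlt]
        exact ih x (by omega)
      · rw [if_neg hlt]
        exact ih z hz

theorem bestEff_eq {α : Type} (g : α → Int) (l : List α) :
    pvExtract3 (l.foldl (pvEffStep g) none) =
    pvMinFirst (fun s => -(g s)) (l.filter (fun s => decide (3 ≤ g s))) none := by
  cases l with
  | nil => rfl
  | cons x t =>
    simp only [List.foldl_cons, pvEffStep_none]
    by_cases hx : (3 : Int) ≤ g x
    · rw [List.filter_cons_of_pos (by simpa using hx)]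
      simp only [pvMinFirst, List.foldl_cons]
      exact bestEff_go_ge g t x hx
    · rw [List.filter_cons_of_neg (by simpa using hx)]
      exact bestEff_go_lt g t x (by omega)

theorem foldl_skip {α : Type} [DecidableEq α] (g : α → Int) (skip : Option α) :
    ∀ (l : List α) (acc : Option (α × Int)),
      l.foldl (fun a s => if skip = some s then a else pvEffStep g a s) acc =
      (l.filter (fun s => !(decide (skip = some s)))).foldl (pvEffStep g) acc := by
  intro l
  induction l with
  | nil => intro acc; rfl
  | cons x t ih =>
    intro acc
    simp only [List.foldl_cons]
    by_cases hs : skip = some x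
    · rw [if_pos hs, List.filter_cons_of_neg (by simp [hs]), ih]
    · rw [if_neg hs, List.filter_cons_of_pos (by simp [hs]), List.foldl_cons, ih]

-- the skip-branch of B's second scan is a filter
theorem bestEff_skip_filter (b t : List (String × List (String × Int))) (skip : Option String)
    (l : List String) :
    pvBestEff b t skip l =
      (l.filter (fun s => !(decide (skip = some s)))).foldl
        (pvEffStep (fun s => pvGet2 b s "questions_asked" - pvGet2 t s "questions_asked"))
        none := by
  unfold pvBestEff
  rw [PySem.List.foldl_congr_mem _ _
      (fun a s => if skip = some s then a
        else pvEffStep (fun s => pvGet2 b s "questions_asked" - pvGet2 t s "questions_asked") a s)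
      _ (by intro acc x _; cases acc <;> rfl)]
  exact foldl_skip _ skip l none

-- A's eff loop is a find?
theorem effLoopA_eq_find? (b t : List (String × List (String × Int)))
    (picks : List (String × String)) (l : List String) :
    pvEffLoopA b t picks l =
      match l.find? (fun sid => !((picks.map Prod.fst).contains sid)
          && decide (3 ≤ pvGet2 b sid "questions_asked" - pvGet2 t sid "questions_asked")) with
      | none => picks
      | some sid => picks ++ [(sid, "Question efficiency win — trained asks far fewer")] := by
  induction l with
  | nil => rfl
  | cons sid rest ih =>
    simp only [pvEffLoopA]
    by_cases hc : (picks.map Prod.fst).contains sid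
    · rw [if_pos hc, List.find?_cons_of_neg
        (by simp only [hc, Bool.not_true, Bool.false_and]; exact Bool.false_ne_true), ih]
    · have hc' : (picks.map Prod.fst).contains sid = false := by simpa using hc
      rw [if_neg (by rw [hc']; exact Bool.false_ne_true)]
      by_cases h3 : 3 ≤ pvGet2 b sid "questions_asked" - pvGet2 t sid "questions_asked"
      · rw [if_pos h3, List.find?_cons_of_pos
          (by simp only [hc', Bool.not_false, Bool.true_and]; exact decide_eq_true h3)]
      · rw [if_neg h3, List.find?_cons_of_neg
          (by simp only [hc', Bool.not_false, Bool.true_and, decide_eq_false h3]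
              exact Bool.false_ne_true), ih]

-- A's failure loop is a find?
theorem failLoopA_eq_find? (t : List (String × List (String × Int)))
    (picks : List (String × String)) (l : List String) :
    pvFailLoopA t picks l =
      match l.find? (fun sid => !((picks.map Prod.fst).contains sid)
          && decide (1 ≤ pvGet2 t sid "questions_asked")
          && decide (pvGet2 t sid "final_score" = 0)) with
      | none => picks
      | some sid => picks ++ [(sid, "Failure mode — trained submits wrong-schema plan")] := by
  induction l with
  | nil => rfl
  | cons sid rest ih =>
    simp only [pvFailLoopA]
    by_cases hc : (picks.map Prod.fst).contains sid
    · rw [if_pos hc, List.find?_cons_of_neg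
        (by simp only [hc, Bool.not_true, Bool.false_and]; exact Bool.false_ne_true), ih]
    · have hc' : (picks.map Prod.fst).contains sid = false := by simpa using hc
      rw [if_neg (by rw [hc']; exact Bool.false_ne_true)]
      by_cases hq : 1 ≤ pvGet2 t sid "questions_asked" ∧ pvGet2 t sid "final_score" = 0
      · rw [if_pos hq, List.find?_cons_of_pos (by
          simp only [hc', Bool.not_false, Bool.true_and, Bool.and_eq_true, decide_eq_true_eq]
          exact ⟨hq.1, hq.2⟩)]
      · rw [if_neg hq, List.find?_cons_of_neg (by
          simp only [hc', Bool.not_false, Bool.true_and]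
          rcases Decidable.not_and_iff_or_not.mp hq with h | h
          · simp only [decide_eq_false h, Bool.false_and]; exact Bool.false_ne_true
          · simp only [decide_eq_false h, Bool.and_false]; exact Bool.false_ne_true), ih]

-- A's fill loop, over a duplicate-free list, is append-the-first-missing-few
theorem fillLoopA_eq (l : List String) (picks : List (String × String)) :
    l.Nodup → picks.length < 3 →
    pvFillLoopA picks l =
      picks ++ ((l.filter (fun s => !((picks.map Prod.fst).contains s))).take
        (3 - picks.length)).map (fun s => (s, "Comparable scenario")) := by
  induction l generalizing picks with
  | nil => intro _ _; simp [pvFillLoopA]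
  | cons sid rest ih =>
    intro hnd hlen
    rw [List.nodup_cons] at hnd
    obtain ⟨hsid, hnd⟩ := hnd
    by_cases hc : (picks.map Prod.fst).contains sid
    · simp only [pvFillLoopA, hc, if_true]
      rw [if_neg (by omega : ¬ 3 ≤ picks.length), ih picks hnd hlen,
        List.filter_cons_of_neg (by simp only [hc, Bool.not_true]; exact Bool.false_ne_true)]
    · have hc' : (picks.map Prod.fst).contains sid = false := by simpa using hc
      simp only [pvFillLoopA, hc', Bool.false_eq_true, if_false]
      rw [List.filter_cons_of_pos (by simp only [hc', Bool.not_false])]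
      by_cases h2 : picks.length = 2
      · rw [if_pos (by simp [List.length_append, h2]),
          (by omega : 3 - picks.length = 1)]
        simp
      · rw [if_neg (by simp only [List.length_append, List.length_cons, List.length_nil]; omega)]
        rw [ih (picks ++ [(sid, "Comparable scenario")]) hnd
          (by simp only [List.length_append, List.length_cons, List.length_nil]; omega)]
        have hfe : rest.filter
              (fun s => !(((picks ++ [(sid, "Comparable scenario")]).map Prod.fst).contains s)) =
            rest.filter (fun s => !((picks.map Prod.fst).contains s)) := by
          apply List.filter_congr
          intro x hx
          have hxs : x ≠ sid := fun h => hsid (h ▸ hx)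
          simp [hxs]
        rw [hfe, (by simp only [List.length_append, List.length_cons, List.length_nil]; omega :
          3 - (picks ++ [(sid, "Comparable scenario")]).length = 3 - picks.length - 1)]
        cases h3 : 3 - picks.length with
        | zero => omega
        | succ k =>
          simp [List.take_succ_cons]

theorem nodup_common (base_idx trained_idx : List (String × List (String × Int))) :
    (pvCommon base_idx trained_idx).Nodup := by
  exact (PySem.List.sorted_perm _ _ false).symm.nodup
    (PySem.Set.nodup_inter _ _ (PySem.Set.nodup_ofList _))

theorem stage234 (b t : List (String × List (String × Int))) (P1 : List (String × String))
    (hskip : ∀ s : String, ((P1.map Prod.fst).contains s) =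
      decide ((P1.head?.map Prod.fst : Option String) = some s)) :
    List.take 3
      (let P3A := pvFailLoopA t
          (pvEffLoopA b t P1
            (PySem.List.sorted (pvCommon b t)
              (fun s => pvGet2 t s "questions_asked" - pvGet2 b s "questions_asked") false))
          (pvCommon b t);
        if P3A.length < 3 ∧ pvCommon b t ≠ [] then pvFillLoopA P3A (pvCommon b t) else P3A) =
    List.take 3
      (let P2B : List (String × String) :=
          (match pvBestEff b t (P1.head?.map Prod.fst) (pvCommon b t) with
          | none => P1
          | some be => if 3 ≤ be.2 then
              P1 ++ [(be.1, "Question efficiency win — trained asks far fewer")] else P1);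
        let P3B : List (String × String) :=
          (match (pvCommon b t).find? (fun s => !((P2B.map Prod.fst).contains s)
              && decide (1 ≤ pvGet2 t s "questions_asked")
              && decide (pvGet2 t s "final_score" = 0)) with
          | none => P2B
          | some s => P2B ++ [(s, "Failure mode — trained submits wrong-schema plan")]);
        if P3B.length < 3 then
          P3B ++ (((pvCommon b t).filter (fun s => !((P3B.map Prod.fst).contains s))).take
            (3 - P3B.length)).map (fun s => (s, "Comparable scenario"))
        else P3B) := by
  have hkey : (fun s => pvGet2 t s "questions_asked" - pvGet2 b s "questions_asked") =
      (fun s : String => -(pvGet2 b s "questions_asked" - pvGet2 t s "questions_asked")) := by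
    funext s; ring
  have h2 : pvEffLoopA b t P1
      (PySem.List.sorted (pvCommon b t)
        (fun s => pvGet2 t s "questions_asked" - pvGet2 b s "questions_asked") false) =
      (match pvBestEff b t (P1.head?.map Prod.fst) (pvCommon b t) with
        | none => P1
        | some be => if 3 ≤ be.2 then
            P1 ++ [(be.1, "Question efficiency win — trained asks far fewer")] else P1) := by
    rw [effLoopA_eq_find?, find?_eq_head?_filter, hkey, filter_sorted, head?_sorted,
      bestEff_skip_filter]
    have hfe : (pvCommon b t).filter
          (fun sid => !((P1.map Prod.fst).contains sid) &&
            decide (3 ≤ pvGet2 b sid "questions_asked" - pvGet2 t sid "questions_asked")) =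
        ((pvCommon b t).filter
            (fun s => !(decide ((P1.head?.map Prod.fst : Option String) = some s)))).filter
          (fun s => decide (3 ≤ pvGet2 b s "questions_asked" - pvGet2 t s "questions_asked")) := by
      rw [List.filter_filter]
      apply List.filter_congr
      intro x _
      rw [hskip x, Bool.and_comm]
    rw [hfe, ← bestEff_eq (fun s => pvGet2 b s "questions_asked" - pvGet2 t s "questions_asked")]
    cases hf : ((pvCommon b t).filter
        (fun s => !(decide ((P1.head?.map Prod.fst : Option String) = some s)))).foldl
        (pvEffStep (fun s => pvGet2 b s "questions_asked" - pvGet2 t s "questions_asked")) none with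
    | none => rfl
    | some be =>
      obtain ⟨s, d⟩ := be
      simp only [pvExtract3]
      by_cases h3 : (3 : Int) ≤ d
      · rw [if_pos h3, if_pos h3]
      · rw [if_neg h3, if_neg h3]
  refine congrArg (List.take 3) ?_
  rw [h2, failLoopA_eq_find?]
  by_cases h3 : (match (pvCommon b t).find? (fun s =>
        !((((match pvBestEff b t (P1.head?.map Prod.fst) (pvCommon b t) with
          | none => P1
          | some be => if 3 ≤ be.2 then
              P1 ++ [(be.1, "Question efficiency win — trained asks far fewer")] else P1) :
            List (String × String)).map Prod.fst).contains s)
        && decide (1 ≤ pvGet2 t s "questions_asked")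
        && decide (pvGet2 t s "final_score" = 0)) with
      | none => (match pvBestEff b t (P1.head?.map Prod.fst) (pvCommon b t) with
          | none => P1
          | some be => if 3 ≤ be.2 then
              P1 ++ [(be.1, "Question efficiency win — trained asks far fewer")] else P1)
      | some s => (match pvBestEff b t (P1.head?.map Prod.fst) (pvCommon b t) with
          | none => P1
          | some be => if 3 ≤ be.2 then
              P1 ++ [(be.1, "Question efficiency win — trained asks far fewer")] else P1) ++
          [(s, "Failure mode — trained submits wrong-schema plan")] :
      List (String × String)).length < 3
  · by_cases hc : pvCommon b t = []
    · rw [if_neg (by rw [hc]; simp), if_pos h3, hc]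
      simp
    · rw [if_pos ⟨h3, hc⟩, if_pos h3, fillLoopA_eq _ _ (nodup_common b t) h3]
  · rw [if_neg (by rw [not_and_or]; exact Or.inl h3), if_neg h3]

theorem main_eq (b t : List (String × List (String × Int))) :
    pick_scenarios_py b t = pick_scenarios_py_alt b t := by
  simp only [pick_scenarios_py, pick_scenarios_py_alt]
  have hbw : (pvBestWin b (pvCommon b t)).1 =
      (PySem.List.sorted
        ((pvCommon b t).filter (fun s => decide (0 < pvGet2 b s "final_score")))
        (fun s => -(pvGet2 b s "final_score")) false).head? := by
    rw [head?_sorted]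
    exact bestWin_eq (fun s => pvGet2 b s "final_score") (pvCommon b t)
  rw [hbw]
  cases hsw : PySem.List.sorted
      ((pvCommon b t).filter (fun s => decide (0 < pvGet2 b s "final_score")))
      (fun s => -(pvGet2 b s "final_score")) false with
  | nil =>
    simp only [List.head?_nil]
    exact stage234 b t [] (by intro s; simp)
  | cons w ws =>
    simp only [List.head?_cons, List.nil_append]
    exact stage234 b t [(w, "Untrained 4B WIN — gap that more training closes")]
      (by intro s; simp [eq_comm])

-- ===== VERDICT (by name: the statement is the Claim_ definition above) =====
theorem pick_scenarios_py_spec : Claim_equal_pick_scenarios_py := by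
  intro base_idx trained_idx _
  unfold Spec_pick_scenarios_py
  exact main_eq base_idx trained_idx
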